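-- pv_equiv track=rewrite | github.com/hankHankkkkkkkkkk/DAT471_fork | assignment3/assignment3_problem4.py | combine_stats
-- ===== SOURCE A (Python) =====
-- def combine_stats(values):
--     max_user_id = None
--     max_count = -1
--     user_count = 0
--     total_followers = 0
--     no_followers_count = 0
--
--     for (
--         user_id,
--         follower_count,
--         partial_user_count,
--         partial_total_followers,
--         partial_no_followers_count,
--     ) in values:
--         if follower_count > max_count or (
--             follower_count == max_count
--             and (max_user_id is None or user_id < max_user_id)
--         ):
--             max_user_id = user_id
--             max_count = follower_count
--
--         user_count += partial_user_count
--         total_followers += partial_total_followers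
--         no_followers_count += partial_no_followers_count
--
--     return max_user_id, max_count, user_count, total_followers, no_followers_count
-- ===== SOURCE B (Python) =====
-- def combine_stats(values):
--     vals = list(values)
--     if not vals:
--         return None, -1, 0, 0, 0
--     u, f, a, b, c = _reduce(vals)
--     return u, f, a, b, c
--
--
-- def _reduce(vals):
--     # divide-and-conquer merge of complete stats records; vals is nonempty
--     n = len(vals)
--     if n == 1:
--         return vals[0]
--     mid = n // 2
--     l = _reduce(vals[:mid])
--     r = _reduce(vals[mid:])
--     if r[1] > l[1] or (r[1] == l[1] and r[0] < l[0]):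
--         u, f = r[0], r[1]
--     else:
--         u, f = l[0], l[1]
--     return u, f, l[2] + r[2], l[3] + r[3], l[4] + r[4]
-- ===== Notes on version B (the rewrite author's own statement) =====
-- stated objective: alternative
-- what changed: Replaces A's single left-to-right accumulator loop with sentinel state (None, -1) by a divide-and-conquer reduction that recursively merges complete stats records of the two halves (merge = pick better-of-two max user + add partial sums).
-- intended difference: On nonempty inputs whose follower counts are all < -1, A returns (None, -1, sums) because its sentinel max_count = -1 is never beaten, while B returns the user with the maximal (negative) follower count, which is the intended max-follower user. — e.g. on combine_stats([(1, -2, 1, 0, 1)]): A returns (none, -1, 1, 0, 1), B returns (some 1, -2, 1, 0, 1)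
import Mathlib
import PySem

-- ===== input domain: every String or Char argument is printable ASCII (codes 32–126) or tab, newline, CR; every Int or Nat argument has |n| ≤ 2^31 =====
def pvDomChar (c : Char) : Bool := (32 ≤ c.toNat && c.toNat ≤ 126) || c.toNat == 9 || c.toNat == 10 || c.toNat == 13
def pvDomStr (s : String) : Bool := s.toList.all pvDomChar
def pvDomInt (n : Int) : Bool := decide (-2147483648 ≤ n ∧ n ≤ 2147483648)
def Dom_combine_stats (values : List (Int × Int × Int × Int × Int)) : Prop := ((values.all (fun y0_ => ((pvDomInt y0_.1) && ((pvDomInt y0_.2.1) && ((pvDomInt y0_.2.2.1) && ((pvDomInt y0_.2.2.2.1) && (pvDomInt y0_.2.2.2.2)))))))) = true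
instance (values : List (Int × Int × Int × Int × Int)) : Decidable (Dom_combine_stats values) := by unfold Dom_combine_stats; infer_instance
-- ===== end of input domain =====

-- B replaces A's accumulator loop (sentinel None/-1 state) by a divide-and-conquer reduction merging
-- complete stats records of the two halves (objective: alternative; not faster).

-- ===== PORT A =====
-- A's in-loop update of (max_user_id, max_count)
def pvSel (mu : Option Int) (mc uid fc : Int) : Option Int × Int :=
  if (decide (mc < fc) || (fc == mc && (match mu with | none => true | some m => decide (uid < m)))) then
    (some uid, fc)
  else (mu, mc)

def combine_stats (values : List (Int × Int × Int × Int × Int)) : Option Int × Int × Int × Int × Int :=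
  values.foldl
    (fun st v =>
      let p := pvSel st.1 st.2.1 v.1 v.2.1
      (p.1, p.2, st.2.2.1 + v.2.2.1, st.2.2.2.1 + v.2.2.2.1, st.2.2.2.2 + v.2.2.2.2))
    (none, -1, 0, 0, 0)

-- ===== PORT B =====
-- merge of two complete stats records (body of _reduce's combining step in Source B)
def pvMerge (l r : Int × Int × Int × Int × Int) : Int × Int × Int × Int × Int :=
  let uf := if (decide (l.2.1 < r.2.1) || (r.2.1 == l.2.1 && decide (r.1 < l.1))) then (r.1, r.2.1)
            else (l.1, l.2.1)
  (uf.1, uf.2, l.2.2.1 + r.2.2.1, l.2.2.2.1 + r.2.2.2.1, l.2.2.2.2 + r.2.2.2.2)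

-- _reduce: only ever called on nonempty lists; the `≤ 1` guard (Python: n == 1) and the headD default
-- exist only to make the recursion total — they are never reached with [] on B's actual call sites.
def pvReduce (vals : List (Int × Int × Int × Int × Int)) : Int × Int × Int × Int × Int :=
  if _h : vals.length ≤ 1 then vals.headD (0, 0, 0, 0, 0)
  else
    pvMerge (pvReduce (vals.take (vals.length / 2))) (pvReduce (vals.drop (vals.length / 2)))
termination_by vals.length
decreasing_by
  · simp only [List.length_take]; omega
  · simp only [List.length_drop]; omega

def combine_stats_alt (values : List (Int × Int × Int × Int × Int)) : Option Int × Int × Int × Int × Int :=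
  match values with
  | [] => (none, -1, 0, 0, 0)
  | _ :: _ =>
    let m := pvReduce values
    (some m.1, m.2.1, m.2.2.1, m.2.2.2.1, m.2.2.2.2)

-- ===== PRECONDITION & SPEC =====
-- On nonempty inputs whose follower counts are ALL below -1, A's sentinel max_count = -1 is never beaten and A
-- returns (None, -1, …) despite users being present, while B returns the user with the (negative) maximal count,
-- which is the intended max-follower user.
def D_combine_stats (values : List (Int × Int × Int × Int × Int)) : Prop :=
  values ≠ [] ∧ ∀ v ∈ values, v.2.1 < -1
instance (values : List (Int × Int × Int × Int × Int)) : Decidable (D_combine_stats values) := by unfold D_combine_stats; infer_instance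
def Spec_combine_stats (values : List (Int × Int × Int × Int × Int)) (out : Option Int × Int × Int × Int × Int) : Prop := ¬ D_combine_stats values → out = combine_stats_alt values
instance (values : List (Int × Int × Int × Int × Int)) (out : Option Int × Int × Int × Int × Int) : Decidable (Spec_combine_stats values out) := by unfold Spec_combine_stats; infer_instance
def pvDiffWitness_combine_stats : (List (Int × Int × Int × Int × Int)) := [(1, -2, 1, 0, 1)]
def pvDiffWitnessOut_combine_stats : (Option Int × Int × Int × Int × Int) × (Option Int × Int × Int × Int × Int) :=
  ((none, -1, 1, 0, 1), (some 1, -2, 1, 0, 1))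

-- ===== CLAIM (what is proved, stated in full; the proofs are below) =====
def Claim_unchanged_combine_stats : Prop := ∀ (values : List (Int × Int × Int × Int × Int)), Dom_combine_stats values → Spec_combine_stats values (combine_stats values)
def Claim_changed_combine_stats : Prop := Dom_combine_stats (pvDiffWitness_combine_stats) ∧ D_combine_stats (pvDiffWitness_combine_stats) ∧ combine_stats (pvDiffWitness_combine_stats) = pvDiffWitnessOut_combine_stats.1 ∧ combine_stats_alt (pvDiffWitness_combine_stats) = pvDiffWitnessOut_combine_stats.2 ∧ pvDiffWitnessOut_combine_stats.1 ≠ pvDiffWitnessOut_combine_stats.2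
def Claim_exact_combine_stats : Prop := ∀ (values : List (Int × Int × Int × Int × Int)), Dom_combine_stats values → D_combine_stats values → combine_stats values ≠ combine_stats_alt values

-- ===== LEMMAS AND PROOFS =====

theorem pvMerge_assoc (a b c : Int × Int × Int × Int × Int) :
    pvMerge (pvMerge a b) c = pvMerge a (pvMerge b c) := by
  obtain ⟨au, af, a3, a4, a5⟩ := a
  obtain ⟨bu, bf, b3, b4, b5⟩ := b
  obtain ⟨cu, cf, c3, c4, c5⟩ := c
  simp only [pvMerge]
  split_ifs <;> simp_all <;> omega

theorem foldl_pvMerge_out (t : List (Int × Int × Int × Int × Int)) :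
    ∀ m y, t.foldl pvMerge (pvMerge m y) = pvMerge m (t.foldl pvMerge y) := by
  induction t with
  | nil => intro m y; rfl
  | cons v t ih =>
    intro m y
    show t.foldl pvMerge (pvMerge (pvMerge m y) v) = pvMerge m (t.foldl pvMerge (pvMerge y v))
    rw [pvMerge_assoc, ih]

theorem pv_foldl_split (x z : Int × Int × Int × Int × Int)
    (l1 zs : List (Int × Int × Int × Int × Int)) :
    (l1 ++ z :: zs).foldl pvMerge x = pvMerge (l1.foldl pvMerge x) (zs.foldl pvMerge z) := by
  rw [List.foldl_append]
  simp only [List.foldl_cons]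
  exact foldl_pvMerge_out zs _ z

theorem pvReduce_eq_foldl : ∀ n (x : Int × Int × Int × Int × Int) xs,
    (x :: xs).length ≤ n → pvReduce (x :: xs) = xs.foldl pvMerge x := by
  intro n
  induction n with
  | zero => intro x xs h; simp at h
  | succ n ih =>
    intro x xs h
    rcases xs with _ | ⟨y0, ys0⟩
    · simp [pvReduce]
    · rw [pvReduce]
      have hlen : ¬ (x :: y0 :: ys0).length ≤ 1 := by simp
      rw [dif_neg hlen]
      obtain ⟨mid, hmidd⟩ : ∃ m, m = (x :: y0 :: ys0).length / 2 := ⟨_, rfl⟩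
      rw [← hmidd]
      have hL : (x :: y0 :: ys0).length = ys0.length + 2 := by simp
      have hmid1 : 1 ≤ mid := by omega
      have hmidlt : mid < ys0.length + 2 := by omega
      rcases hm : mid with _ | k
      · omega
      · have htake : (x :: y0 :: ys0).take (k + 1) = x :: (y0 :: ys0).take k := by
          simp [List.take_succ_cons]
        have hdrop : (x :: y0 :: ys0).drop (k + 1) = (y0 :: ys0).drop k := by
          simp [List.drop_succ_cons]
        rcases hd : (y0 :: ys0).drop k with _ | ⟨z, zs⟩
        · exfalso
          have := congrArg List.length hd
          simp only [List.length_drop, List.length_cons, List.length_nil] at this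
          omega
        · rw [htake, hdrop, hd]
          have hzs := congrArg List.length hd
          simp only [List.length_drop, List.length_cons] at hzs
          have hlt : (x :: (y0 :: ys0).take k).length ≤ n := by
            simp only [List.length_cons, List.length_take, List.length_cons] at h ⊢
            omega
          have hrt : (z :: zs).length ≤ n := by
            simp only [List.length_cons] at h ⊢
            omega
          rw [ih x _ hlt, ih z zs hrt]
          have hsplit : (y0 :: ys0) = (y0 :: ys0).take k ++ (z :: zs) := by
            rw [← hd, List.take_append_drop]
          conv_rhs => rw [hsplit]
          rw [pv_foldl_split]

-- proof-side view of A's (max_user_id, max_count) fold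
def pvSelFold (vs : List (Int × Int × Int × Int × Int)) (s : Option Int × Int) : Option Int × Int :=
  vs.foldl (fun s v => pvSel s.1 s.2 v.1 v.2.1) s

def pvProj (b : Int × Int × Int × Int × Int) : Option Int × Int := (some b.1, b.2.1)

theorem pv_step_some (p v : Int × Int × Int × Int × Int) :
    pvSel (some p.1) p.2.1 v.1 v.2.1 = pvProj (pvMerge p v) := by
  simp only [pvSel, pvMerge, pvProj]
  by_cases hc : (decide (p.2.1 < v.2.1) || (v.2.1 == p.2.1 && decide (v.1 < p.1))) = true
  · rw [if_pos hc, if_pos hc]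
  · rw [if_neg hc, if_neg hc]

theorem pv_L1 (t : List (Int × Int × Int × Int × Int)) :
    ∀ p : Int × Int × Int × Int × Int,
    pvSelFold t (some p.1, p.2.1) = pvProj (t.foldl pvMerge p) := by
  induction t with
  | nil => intro p; rfl
  | cons v t ih =>
    intro p
    show pvSelFold t (pvSel (some p.1) p.2.1 v.1 v.2.1) = pvProj (t.foldl pvMerge (pvMerge p v))
    rw [pv_step_some p v]
    exact ih (pvMerge p v)

theorem pvMerge_proj_cases (p v : Int × Int × Int × Int × Int) :
    (pvMerge p v).1 = v.1 ∧ (pvMerge p v).2.1 = v.2.1 ∨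
    (pvMerge p v).1 = p.1 ∧ (pvMerge p v).2.1 = p.2.1 := by
  simp only [pvMerge]
  split_ifs <;> simp

theorem pv_L2 (t : List (Int × Int × Int × Int × Int)) :
    ∀ p : Int × Int × Int × Int × Int, p.2.1 < -1 → (∃ u ∈ t, -1 ≤ u.2.1) →
    pvSelFold t (none, -1) = pvProj (t.foldl pvMerge p) := by
  induction t with
  | nil => intro p _ hex; simp at hex
  | cons u t ih =>
    intro p hp hex
    by_cases hu : -1 ≤ u.2.1
    · have hA : pvSel none (-1) u.1 u.2.1 = (some u.1, u.2.1) := by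
        rcases lt_or_eq_of_le hu with h | h
        · simp [pvSel, h]
        · simp [pvSel, ← h]
      have hB : pvMerge p u = (u.1, u.2.1, p.2.2.1 + u.2.2.1, p.2.2.2.1 + u.2.2.2.1, p.2.2.2.2 + u.2.2.2.2) := by
        have h : p.2.1 < u.2.1 := by omega
        simp [pvMerge, h]
      show pvSelFold t (pvSel none (-1) u.1 u.2.1) = pvProj (t.foldl pvMerge (pvMerge p u))
      rw [hA]
      have := pv_L1 t (pvMerge p u)
      rw [hB] at this ⊢
      exact this
    · have hu' : u.2.1 < -1 := by omega
      have hA : pvSel none (-1) u.1 u.2.1 = (none, -1) := by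
        have h1 : ¬ ((-1 : Int) < u.2.1) := by omega
        have h2 : u.2.1 ≠ -1 := by omega
        simp [pvSel, h1, h2]
      have hex' : ∃ w ∈ t, -1 ≤ w.2.1 := by
        rcases hex with ⟨w, hw, hw2⟩
        rcases List.mem_cons.mp hw with h | h
        · subst h; omega
        · exact ⟨w, h, hw2⟩
      show pvSelFold t (pvSel none (-1) u.1 u.2.1) = pvProj (t.foldl pvMerge (pvMerge p u))
      rw [hA]
      have hq : (pvMerge p u).2.1 < -1 := by
        rcases pvMerge_proj_cases p u with ⟨_, h2⟩ | ⟨_, h2⟩ <;> rw [h2] <;> omega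
      exact ih (pvMerge p u) hq hex'

theorem pv_sel_all_neg (vs : List (Int × Int × Int × Int × Int)) :
    (∀ v ∈ vs, v.2.1 < -1) → pvSelFold vs (none, -1) = (none, -1) := by
  induction vs with
  | nil => intro _; rfl
  | cons v t ih =>
    intro h
    have hv := h v (List.mem_cons_self)
    have hA : pvSel none (-1) v.1 v.2.1 = (none, -1) := by
      have h1 : ¬ ((-1 : Int) < v.2.1) := by omega
      have h2 : v.2.1 ≠ -1 := by omega
      simp [pvSel, h1, h2]
    show pvSelFold t (pvSel none (-1) v.1 v.2.1) = (none, -1)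
    rw [hA]
    exact ih (fun w hw => h w (List.mem_cons_of_mem _ hw))

theorem pv_sums (t : List (Int × Int × Int × Int × Int)) :
    ∀ p : Int × Int × Int × Int × Int,
    (t.foldl pvMerge p).2.2.1 = p.2.2.1 + (t.map (fun v => v.2.2.1)).sum ∧
    (t.foldl pvMerge p).2.2.2.1 = p.2.2.2.1 + (t.map (fun v => v.2.2.2.1)).sum ∧
    (t.foldl pvMerge p).2.2.2.2 = p.2.2.2.2 + (t.map (fun v => v.2.2.2.2)).sum := by
  induction t with
  | nil => intro p; simp
  | cons v t ih =>
    intro p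
    simp only [List.foldl_cons, List.map_cons, List.sum_cons]
    rcases ih (pvMerge p v) with ⟨h1, h2, h3⟩
    have hm : (pvMerge p v).2.2.1 = p.2.2.1 + v.2.2.1 ∧ (pvMerge p v).2.2.2.1 = p.2.2.2.1 + v.2.2.2.1 ∧
        (pvMerge p v).2.2.2.2 = p.2.2.2.2 + v.2.2.2.2 := by
      simp [pvMerge]
    rw [h1, h2, h3, hm.1, hm.2.1, hm.2.2]
    refine ⟨by ring, by ring, by ring⟩

theorem pv_fold_decomp (vs : List (Int × Int × Int × Int × Int)) :
    ∀ (s : Option Int × Int) (a b c : Int),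
    vs.foldl
      (fun st v =>
        let p := pvSel st.1 st.2.1 v.1 v.2.1
        (p.1, p.2, st.2.2.1 + v.2.2.1, st.2.2.2.1 + v.2.2.2.1, st.2.2.2.2 + v.2.2.2.2))
      (s.1, s.2, a, b, c) =
      ((pvSelFold vs s).1, (pvSelFold vs s).2,
        a + (vs.map (fun v => v.2.2.1)).sum, b + (vs.map (fun v => v.2.2.2.1)).sum,
        c + (vs.map (fun v => v.2.2.2.2)).sum) := by
  induction vs with
  | nil => intro s a b c; simp [pvSelFold]
  | cons v t ih =>
    intro s a b c
    simp only [List.foldl_cons, List.map_cons, List.sum_cons]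
    rw [ih (pvSel s.1 s.2 v.1 v.2.1) (a + v.2.2.1) (b + v.2.2.2.1) (c + v.2.2.2.2)]
    simp [pvSelFold]
    refine ⟨by ring, by ring, by ring⟩

theorem pv_A_eq (values : List (Int × Int × Int × Int × Int)) :
    combine_stats values =
      ((pvSelFold values (none, -1)).1, (pvSelFold values (none, -1)).2,
        (values.map (fun v => v.2.2.1)).sum, (values.map (fun v => v.2.2.2.1)).sum,
        (values.map (fun v => v.2.2.2.2)).sum) := by
  have h := pv_fold_decomp values ((none : Option Int), (-1 : Int)) 0 0 0
  simp only [zero_add] at h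
  exact h

theorem pv_B_eq (v : Int × Int × Int × Int × Int) (t : List (Int × Int × Int × Int × Int)) :
    combine_stats_alt (v :: t) =
      ((pvProj (t.foldl pvMerge v)).1, (pvProj (t.foldl pvMerge v)).2,
        v.2.2.1 + (t.map (fun w => w.2.2.1)).sum, v.2.2.2.1 + (t.map (fun w => w.2.2.2.1)).sum,
        v.2.2.2.2 + (t.map (fun w => w.2.2.2.2)).sum) := by
  show (some (pvReduce (v :: t)).1, (pvReduce (v :: t)).2.1, (pvReduce (v :: t)).2.2.1,
        (pvReduce (v :: t)).2.2.2.1, (pvReduce (v :: t)).2.2.2.2) = _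
  rw [pvReduce_eq_foldl (v :: t).length v t le_rfl]
  rcases pv_sums t v with ⟨h1, h2, h3⟩
  rw [h1, h2, h3]
  rfl

-- ===== VERDICT (by name: the statement is the Claim_ definition above) =====
theorem combine_stats_spec : Claim_unchanged_combine_stats := by
  intro values _ hnd
  rcases values with _ | ⟨v, t⟩
  · rfl
  · show combine_stats (v :: t) = combine_stats_alt (v :: t)
    rw [pv_A_eq, pv_B_eq]
    have hex : ∃ u ∈ v :: t, -1 ≤ u.2.1 := by
      unfold D_combine_stats at hnd
      push Not at hnd
      rcases hnd (List.cons_ne_nil v t) with ⟨u, hu, hu2⟩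
      exact ⟨u, hu, by omega⟩
    have hsel : pvSelFold (v :: t) (none, -1) = pvProj (t.foldl pvMerge v) := by
      show pvSelFold t (pvSel none (-1) v.1 v.2.1) = pvProj (t.foldl pvMerge v)
      by_cases hv : -1 ≤ v.2.1
      · have hA : pvSel none (-1) v.1 v.2.1 = (some v.1, v.2.1) := by
          rcases lt_or_eq_of_le hv with h | h
          · simp [pvSel, h]
          · simp [pvSel, ← h]
        rw [hA]; exact pv_L1 t v
      · have hv' : v.2.1 < -1 := by omega
        have hA : pvSel none (-1) v.1 v.2.1 = (none, -1) := by
          have h1 : ¬ ((-1 : Int) < v.2.1) := by omega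
          have h2 : v.2.1 ≠ -1 := by omega
          simp [pvSel, h1, h2]
        rw [hA]
        have hex' : ∃ u ∈ t, -1 ≤ u.2.1 := by
          rcases hex with ⟨u, hu, hu2⟩
          rcases List.mem_cons.mp hu with h | h
          · subst h; omega
          · exact ⟨u, h, hu2⟩
        exact pv_L2 t v hv' hex'
    rw [hsel]
    simp [List.map_cons, List.sum_cons]

theorem combine_stats_changed : Claim_changed_combine_stats := by
  unfold Claim_changed_combine_stats
  refine ⟨by decide, by decide, by decide, ?_, by decide⟩
  show combine_stats_alt [(1, -2, 1, 0, 1)] = (some 1, -2, 1, 0, 1)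
  rw [show combine_stats_alt [(1, -2, 1, 0, 1)] = (some (pvReduce [(1, -2, 1, 0, 1)]).1,
      (pvReduce [(1, -2, 1, 0, 1)]).2.1, (pvReduce [(1, -2, 1, 0, 1)]).2.2.1,
      (pvReduce [(1, -2, 1, 0, 1)]).2.2.2.1, (pvReduce [(1, -2, 1, 0, 1)]).2.2.2.2) from rfl]
  rw [pvReduce_eq_foldl 1 (1, -2, 1, 0, 1) [] le_rfl]
  rfl

theorem combine_stats_tight : Claim_exact_combine_stats := by
  intro values _ hd
  rcases hd with ⟨hne, hall⟩
  rcases values with _ | ⟨v, t⟩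
  · exact absurd rfl hne
  · rw [pv_A_eq, pv_sel_all_neg _ hall]
    intro h
    have h1 := congrArg (fun r : Option Int × Int × Int × Int × Int => r.1) h
    simp only at h1
    rw [show combine_stats_alt (v :: t) = (some (pvReduce (v :: t)).1, (pvReduce (v :: t)).2.1,
        (pvReduce (v :: t)).2.2.1, (pvReduce (v :: t)).2.2.2.1, (pvReduce (v :: t)).2.2.2.2) from rfl] at h1
    simp at h1
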